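-- pv_equiv track=rewrite | github.com/fbatroni/se_2024_hands_on | python/string_manipulation.py | article_count
-- ===== SOURCE A (Python) =====
-- def article_count(input_string):
--     articles = ['a', 'an', 'the']
--     words = input_string.lower().split()
--     count = 0
--     for word in words:
--         if word in articles:
--             count += 1
--     return count
-- ===== SOURCE B (Python) =====
-- def article_count(input_string):
--     words = input_string.lower().split()
--     return words.count('a') + words.count('an') + words.count('the')
-- ===== Notes on version B (the rewrite author's own statement) =====
-- stated objective: idiomatic
-- what changed: Removes A's single accumulator loop with a per-word membership test against the articles list; B instead makes three staged list.count passes, one per fixed article word, and sums the three counts.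
import Mathlib
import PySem

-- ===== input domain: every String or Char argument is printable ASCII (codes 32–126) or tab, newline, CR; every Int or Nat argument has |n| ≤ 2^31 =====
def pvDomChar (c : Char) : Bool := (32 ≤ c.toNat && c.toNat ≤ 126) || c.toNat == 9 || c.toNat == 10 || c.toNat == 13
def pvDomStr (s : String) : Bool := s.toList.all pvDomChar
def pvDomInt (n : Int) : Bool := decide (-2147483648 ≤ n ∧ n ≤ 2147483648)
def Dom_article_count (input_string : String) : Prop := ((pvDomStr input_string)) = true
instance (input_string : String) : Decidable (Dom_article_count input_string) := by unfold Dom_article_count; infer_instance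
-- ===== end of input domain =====

-- B replaces A's one accumulator loop with a per-word membership test by three staged list.count passes (one per article) summed (idiomatic, same cost).


-- ===== PORT A =====
def article_count (input_string : String) : Int :=
  let articles : List String := ["a", "an", "the"]
  let words := PySem.Str.split₀ (PySem.Str.lower input_string)
  words.foldl (fun count word => if word ∈ articles then count + 1 else count) 0

-- ===== PORT B =====
def article_count_alt (input_string : String) : Int :=
  let words := PySem.Str.split₀ (PySem.Str.lower input_string)
  (PySem.List.count words "a" : Int) + (PySem.List.count words "an" : Int)
    + (PySem.List.count words "the" : Int)

-- ===== PRECONDITION & SPEC =====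
def Spec_article_count (input_string : String) (out : Int) : Prop := out = article_count_alt input_string
instance (input_string : String) (out : Int) : Decidable (Spec_article_count input_string out) := by unfold Spec_article_count; infer_instance

-- ===== CLAIM (what is proved, stated in full; the proofs are below) =====
def Claim_equal_article_count : Prop := ∀ (input_string : String), Dom_article_count input_string → Spec_article_count input_string (article_count input_string)

-- ===== LEMMAS AND PROOFS =====

-- A's membership loop counts exactly the three article words
theorem article_foldl_eq_counts (ws : List String) (n : Int) :
    ws.foldl (fun count word => if word ∈ ["a", "an", "the"] then count + 1 else count) n
      = n + ((ws.count "a" : Int) + (ws.count "an" : Int) + (ws.count "the" : Int)) := by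
  induction ws generalizing n with
  | nil => simp
  | cons w ws ih =>
    simp only [List.foldl_cons, ih, List.count_cons]
    by_cases h1 : w = "a" <;> by_cases h2 : w = "an" <;> by_cases h3 : w = "the" <;>
      simp_all <;> ring

-- ===== VERDICT (by name: the statement is the Claim_ definition above) =====
theorem article_count_spec : Claim_equal_article_count := by
  intro s _
  unfold Spec_article_count article_count article_count_alt
  simp only [PySem.List.count_eq, article_foldl_eq_counts]
  ring
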